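-- pv_equiv track=rewrite | github.com/Uxinnn/Advent-of-Code | 2022/day15/day15.py | get_row_range
-- ===== SOURCE A (Python) =====
-- def get_cover(row, sensor, manhattan_dist):
--     """
--     Get the range of points in the row which is covered by the sensor
--     """
--     y_diff = abs(row - sensor[1])
--     x_range = (sensor[0] - manhattan_dist + y_diff, sensor[0] + manhattan_dist - y_diff)
--     if x_range[0] > x_range[1]:
--         return None
--     return x_range
--
-- def combine_ranges(x_ranges):
--     """
--     Combine overlapping ranges. Minimizes the number of ranges in the list.
--     """
--     combined_ranges = list()
--     x_ranges.sort()
--     for x_range in x_ranges: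
--         if not combined_ranges:
--             combined_ranges.append(list(x_range))
--             continue
--         last_range = combined_ranges[-1]
--         if x_range[0] <= last_range[1] < x_range[1] or last_range[1] + 1 == x_range[0]:
--             combined_ranges[-1][1] = x_range[1]
--         elif x_range[0] > last_range[1]:
--             combined_ranges.append(list(x_range))
--     return combined_ranges
--
-- def get_row_range(row, objects):
--     """
--     Get the ranges of points in a row which are covered by all sensors.
--     """
--     x_ranges = list()
--     for sensor, beacon in objects:
--         manhattan_dist = abs(sensor[0] - beacon[0]) + abs(sensor[1] - beacon[1])
--         x_range = get_cover(row, sensor, manhattan_dist)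
--         if x_range is not None:
--             x_ranges.append(x_range)
--     combined_ranges = combine_ranges(x_ranges)
--     return combined_ranges
-- ===== SOURCE B (Python) =====
-- def get_row_range(row, objects):
--     """
--     Merged covered x-ranges in `row`: collect per-sensor spans, sort them,
--     then build the merged list back-to-front with a cascading front-absorb.
--     """
--     spans = []
--     for sensor, beacon in objects:
--         reach = abs(sensor[0] - beacon[0]) + abs(sensor[1] - beacon[1]) - abs(row - sensor[1])
--         if reach >= 0:
--             spans.append((sensor[0] - reach, sensor[0] + reach))
--     spans.sort()
--     merged = []
--     for lo, hi in reversed(spans):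
--         i = 0
--         while i < len(merged) and merged[i][0] <= hi + 1:
--             hi = max(hi, merged[i][1])
--             i += 1
--         merged = [(lo, hi)] + merged[i:]
--     return [[lo, hi] for lo, hi in merged]
-- ===== Notes on version B (the rewrite author's own statement) =====
-- stated objective: alternative
-- what changed: A sorts the spans and left-scans, growing a result list whose last interval it mutates in place (with a three-way overlap/adjacent/disjoint branch); B sorts the same spans but builds the merged list back-to-front, absorbing each span into the front of the already-merged suffix with a single cascading 'merged[i][0] <= hi+1' loop, and it also inlines get_cover as a single reach = dist - ydiff computation.
import Mathlib
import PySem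

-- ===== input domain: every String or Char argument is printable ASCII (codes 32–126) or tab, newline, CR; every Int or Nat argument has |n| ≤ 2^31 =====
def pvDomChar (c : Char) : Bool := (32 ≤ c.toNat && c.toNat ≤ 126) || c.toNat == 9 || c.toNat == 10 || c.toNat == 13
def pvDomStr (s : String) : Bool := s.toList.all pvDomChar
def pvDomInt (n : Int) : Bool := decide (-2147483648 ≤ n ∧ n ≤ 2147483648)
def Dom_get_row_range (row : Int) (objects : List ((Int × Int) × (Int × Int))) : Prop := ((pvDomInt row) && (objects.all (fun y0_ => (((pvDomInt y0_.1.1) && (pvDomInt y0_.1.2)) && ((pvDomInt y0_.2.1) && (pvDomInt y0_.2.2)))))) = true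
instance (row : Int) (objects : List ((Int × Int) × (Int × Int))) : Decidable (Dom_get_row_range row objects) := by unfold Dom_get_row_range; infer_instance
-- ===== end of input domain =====

-- B replaces A's sort-then-left-scan (which mutates the last merged interval) by a
-- back-to-front right pass with a cascading front-absorb; same return value (alternative decomposition).

-- ===== PORT A =====
-- The 2-element lists [lo, hi] A manipulates are carried as pairs (lo, hi) and turned
-- into the list-of-lists output at the end; every value and traversal is A's.
def get_cover (row : Int) (sensor : Int × Int) (manhattan_dist : Int) : Option (Int × Int) :=
  let y_diff := |row - sensor.2|
  let x_range := (sensor.1 - manhattan_dist + y_diff, sensor.1 + manhattan_dist - y_diff)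
  if x_range.1 > x_range.2 then none
  else some x_range

-- loop body of combine_ranges (combined_ranges[-1] access and in-place [-1][1] update)
def combineStep (combined_ranges : List (Int × Int)) (x_range : Int × Int) : List (Int × Int) :=
  match combined_ranges.getLast? with
  | none => combined_ranges ++ [x_range]
  | some last_range =>
    if (x_range.1 ≤ last_range.2 ∧ last_range.2 < x_range.2) ∨ last_range.2 + 1 = x_range.1 then
      combined_ranges.dropLast ++ [(last_range.1, x_range.2)]
    else if x_range.1 > last_range.2 then combined_ranges ++ [x_range]
    else combined_ranges

def combine_ranges (x_ranges : List (Int × Int)) : List (List Int) :=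
  (((PySem.List.sorted2 x_ranges (fun p => p.1) (fun p => p.2)).foldl combineStep []).map
    (fun p => [p.1, p.2]))

-- loop body of get_row_range
def coverStep (row : Int) (acc : List (Int × Int)) (ob : (Int × Int) × (Int × Int)) : List (Int × Int) :=
  let manhattan_dist := |ob.1.1 - ob.2.1| + |ob.1.2 - ob.2.2|
  match get_cover row ob.1 manhattan_dist with
  | some x_range => acc ++ [x_range]
  | none => acc

def get_row_range (row : Int) (objects : List ((Int × Int) × (Int × Int))) : List (List Int) :=
  combine_ranges (objects.foldl (coverStep row) [])

-- ===== PORT B =====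
-- the while loop of Source B's _absorb step (cascading merge at the front of `merged`)
def absorbFront (lo hi : Int) (merged : List (Int × Int)) : List (Int × Int) :=
  match merged with
  | [] => [(lo, hi)]
  | (c, d) :: t => if c ≤ hi + 1 then absorbFront lo (max hi d) t else (lo, hi) :: (c, d) :: t

def spanStep (row : Int) (acc : List (Int × Int)) (ob : (Int × Int) × (Int × Int)) : List (Int × Int) :=
  let reach := |ob.1.1 - ob.2.1| + |ob.1.2 - ob.2.2| - |row - ob.1.2|
  if reach ≥ 0 then acc ++ [(ob.1.1 - reach, ob.1.1 + reach)] else acc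

def get_row_range_alt (row : Int) (objects : List ((Int × Int) × (Int × Int))) : List (List Int) :=
  let spans := objects.foldl (spanStep row) []
  let sortedSpans := PySem.List.sorted2 spans (fun p => p.1) (fun p => p.2)
  let merged := sortedSpans.reverse.foldl (fun m p => absorbFront p.1 p.2 m) []
  merged.map (fun p => [p.1, p.2])

-- ===== PRECONDITION & SPEC =====
def Spec_get_row_range (row : Int) (objects : List ((Int × Int) × (Int × Int))) (out : List (List Int)) : Prop := out = get_row_range_alt row objects
instance (row : Int) (objects : List ((Int × Int) × (Int × Int))) (out : List (List Int)) : Decidable (Spec_get_row_range row objects out) := by unfold Spec_get_row_range; infer_instance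

-- ===== CLAIM (what is proved, stated in full; the proofs are below) =====
def Claim_equal_get_row_range : Prop := ∀ (row : Int) (objects : List ((Int × Int) × (Int × Int))), Dom_get_row_range row objects → Spec_get_row_range row objects (get_row_range row objects)

-- ===== LEMMAS AND PROOFS =====

-- canonical left-to-right merge of a list of valid intervals into the open interval (lo, hi)
def mergeS (lo hi : Int) : List (Int × Int) → List (Int × Int)
  | [] => [(lo, hi)]
  | (a, b) :: t => if a ≤ hi + 1 then mergeS lo (max hi b) t else (lo, hi) :: mergeS a b t

theorem mergeS_cons (lo hi a b : Int) (t : List (Int × Int)) :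
    mergeS lo hi ((a, b) :: t) = if a ≤ hi + 1 then mergeS lo (max hi b) t else (lo, hi) :: mergeS a b t := rfl

theorem absorbFront_cons (lo hi c d : Int) (t : List (Int × Int)) :
    absorbFront lo hi ((c, d) :: t) = if c ≤ hi + 1 then absorbFront lo (max hi d) t else (lo, hi) :: (c, d) :: t := rfl

theorem coverStep_eq_spanStep (row : Int) (acc : List (Int × Int)) (ob : (Int × Int) × (Int × Int)) :
    coverStep row acc ob = spanStep row acc ob := by
  obtain ⟨⟨s1, s2⟩, ⟨b1, b2⟩⟩ := ob
  simp only [coverStep, spanStep, get_cover]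
  set y := |row - s2| with hy
  set m := |s1 - b1| + |s2 - b2| with hm
  by_cases h : s1 - m + y > s1 + m - y
  · rw [if_pos h, if_neg (by omega)]
  · rw [if_neg h, if_pos (by omega)]
    have h1 : s1 - m + y = s1 - (m - y) := by ring
    have h2 : s1 + m - y = s1 + (m - y) := by ring
    rw [h1, h2]

theorem spans_valid (row : Int) : ∀ (objects : List ((Int × Int) × (Int × Int))) (acc : List (Int × Int)),
    ∀ p ∈ objects.foldl (spanStep row) acc, p ∈ acc ∨ p.1 ≤ p.2 := by
  intro objects
  induction objects with
  | nil => intro acc p hp; exact Or.inl hp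
  | cons ob t ih =>
    intro acc p hp
    rcases ih (spanStep row acc ob) p hp with h | h
    · simp only [spanStep] at h
      split_ifs at h with hr
      · rcases List.mem_append.mp h with h' | h'
        · exact Or.inl h'
        · right
          have := List.mem_singleton.mp h'
          subst this
          dsimp only
          omega
      · exact Or.inl h
    · exact Or.inr h

theorem foldl_combineStep (xs : List (Int × Int)) (hval : ∀ p ∈ xs, p.1 ≤ p.2) :
    ∀ (acc : List (Int × Int)) (lo hi : Int),
      List.foldl combineStep (acc ++ [(lo, hi)]) xs = acc ++ mergeS lo hi xs := by
  induction xs with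
  | nil => intro acc lo hi; simp [mergeS]
  | cons x t ih =>
    obtain ⟨a, b⟩ := x
    have hab : a ≤ b := hval (a, b) (by simp)
    have hvt : ∀ p ∈ t, p.1 ≤ p.2 := fun p hp => hval p (List.mem_cons_of_mem _ hp)
    intro acc lo hi
    rw [List.foldl_cons]
    have hstep : combineStep (acc ++ [(lo, hi)]) (a, b) =
        if a ≤ hi + 1 ∧ hi < b then acc ++ [(lo, b)]
        else if a ≤ hi + 1 then acc ++ [(lo, hi)]
        else (acc ++ [(lo, hi)]) ++ [(a, b)] := by
      unfold combineStep
      rw [List.getLast?_concat, List.dropLast_concat]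
      dsimp only
      split_ifs with h1 h2 h3 h4 h5 <;> first | rfl | omega
    rw [hstep, mergeS_cons]
    by_cases h1 : a ≤ hi + 1
    · by_cases h2 : hi < b
      · rw [if_pos ⟨h1, h2⟩, if_pos h1, max_eq_right (le_of_lt h2)]
        exact ih hvt acc lo b
      · rw [if_neg (by omega), if_pos h1, if_pos h1, max_eq_left (by omega : b ≤ hi)]
        exact ih hvt acc lo hi
    · rw [if_neg (by omega), if_neg h1, if_neg h1]
      rw [ih hvt (acc ++ [(lo, hi)]) a b]
      simp [List.append_assoc]

theorem absorbFront_head (M : List (Int × Int)) (lo : Int) : ∀ hi : Int,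
    ∃ h' t', absorbFront lo hi M = (lo, h') :: t' := by
  induction M with
  | nil => intro hi; exact ⟨hi, [], rfl⟩
  | cons x t ih =>
    obtain ⟨c, d⟩ := x
    intro hi
    rw [absorbFront_cons]
    by_cases h : c ≤ hi + 1
    · rw [if_pos h]; exact ih (max hi d)
    · rw [if_neg h]; exact ⟨hi, (c, d) :: t, rfl⟩

theorem absorbFront_absorbFront (M : List (Int × Int)) (lo a : Int) : ∀ hi b : Int, a ≤ hi + 1 →
    absorbFront lo hi (absorbFront a b M) = absorbFront lo (max hi b) M := by
  induction M with
  | nil =>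
    intro hi b h
    show absorbFront lo hi [(a, b)] = [(lo, max hi b)]
    rw [absorbFront_cons, if_pos (by omega)]
    rfl
  | cons x t ih =>
    obtain ⟨c, d⟩ := x
    intro hi b h
    rw [absorbFront_cons a b c d t, absorbFront_cons lo (max hi b) c d t]
    by_cases hc : c ≤ b + 1
    · rw [if_pos hc, if_pos (by omega), ih hi (max b d) h, ← max_assoc]
    · rw [if_neg hc, absorbFront_cons lo hi a b ((c, d) :: t), if_pos h, absorbFront_cons]

theorem mergeS_eq_foldr_absorb (xs : List (Int × Int)) : ∀ lo hi : Int,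
    mergeS lo hi xs = absorbFront lo hi (xs.foldr (fun p m => absorbFront p.1 p.2 m) []) := by
  induction xs with
  | nil => intro lo hi; rfl
  | cons x t ih =>
    obtain ⟨a, b⟩ := x
    intro lo hi
    rw [List.foldr_cons, mergeS_cons]
    by_cases h : a ≤ hi + 1
    · rw [if_pos h, absorbFront_absorbFront _ _ _ _ _ h, ih]
    · rw [if_neg h]
      obtain ⟨h', t', heq⟩ := absorbFront_head (t.foldr (fun p m => absorbFront p.1 p.2 m) []) a b
      rw [heq, absorbFront_cons, if_neg (by omega), ← heq, ← ih]

-- ===== VERDICT (by name: the statement is the Claim_ definition above) =====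
theorem get_row_range_spec : Claim_equal_get_row_range := by
  intro row objects _
  show get_row_range row objects = get_row_range_alt row objects
  simp only [get_row_range, get_row_range_alt, combine_ranges]
  have hsteps : coverStep row = spanStep row :=
    funext fun acc => funext fun ob => coverStep_eq_spanStep row acc ob
  rw [hsteps]
  have hvalS : ∀ p ∈ PySem.List.sorted2 (objects.foldl (spanStep row) [])
      (fun p => p.1) (fun p => p.2), p.1 ≤ p.2 := by
    intro p hp
    have hmem : p ∈ objects.foldl (spanStep row) [] :=
      (PySem.List.sorted2_perm _ _ _ _).mem_iff.mp hp
    rcases spans_valid row objects [] p hmem with h | h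
    · exact absurd h (List.not_mem_nil)
    · exact h
  rw [List.foldl_reverse]
  revert hvalS
  generalize PySem.List.sorted2 (objects.foldl (spanStep row) []) (fun p => p.1) (fun p => p.2) = s
  intro hvalS
  cases s with
  | nil => rfl
  | cons hd tl =>
    obtain ⟨lo, hi⟩ := hd
    have hvt : ∀ p ∈ tl, p.1 ≤ p.2 := fun p hp => hvalS p (List.mem_cons_of_mem _ hp)
    rw [List.foldl_cons, List.foldr_cons]
    have h0 : combineStep [] (lo, hi) = [] ++ [(lo, hi)] := rfl
    rw [h0, foldl_combineStep tl hvt [] lo hi, List.nil_append]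
    rw [mergeS_eq_foldr_absorb tl lo hi]
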